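-- pv_equiv track=rewrite | github.com/Prestongittyup/Family-Orchestrator-Bot | apps/api/integration_core/architecture_guard.py | _is_forbidden
-- ===== SOURCE A (Python) =====
-- from typing import Iterable
--
-- FORBIDDEN_IMPORT_PREFIXES: tuple[str, ...] = (
--     # OS-1 ingress/ingestion paths
--     "apps.api.ingestion",
--     # OS-2 decision engine paths
--     "apps.api.services.decision_engine",
--     # Legacy/deleted runtime paths
--     "apps.api.services.synthesis_engine",
--     "apps.api.services.worker",
--     "modules.core.services.orchestrator_lite",
--     # Brief rendering layer
--     "apps.api.endpoints.brief_renderer_v1",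
-- )
--
-- def _is_forbidden(module_name: str, forbidden_prefixes: Iterable[str] = FORBIDDEN_IMPORT_PREFIXES) -> bool:
--     name = str(module_name or "").strip()
--     if not name:
--         return False
--
--     for prefix in forbidden_prefixes:
--         if name == prefix or name.startswith(f"{prefix}."):
--             return True
--     return False
-- ===== SOURCE B (Python) =====
-- FORBIDDEN_IMPORT_PREFIXES: tuple[str, ...] = (
--     "apps.api.ingestion",
--     "apps.api.services.decision_engine",
--     "apps.api.services.synthesis_engine",
--     "apps.api.services.worker",
--     "modules.core.services.orchestrator_lite",
--     "apps.api.endpoints.brief_renderer_v1",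
-- )
--
-- def _is_forbidden(module_name, forbidden_prefixes=FORBIDDEN_IMPORT_PREFIXES):
--     name = str(module_name or "").strip()
--     if not name:
--         return False
--     forbidden = set(forbidden_prefixes)
--     parts = name.split(".")
--     for i in range(len(parts), 0, -1):
--         if ".".join(parts[:i]) in forbidden:
--             return True
--     return False
-- ===== Notes on version B (the rewrite author's own statement) =====
-- stated objective: idiomatic
-- what changed: Instead of scanning every forbidden prefix with an equality/startswith test, B builds a set of the prefixes once, splits the stripped name on '.' and walks its dot-boundary ancestors (longest first) against that set.
import Mathlib
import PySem

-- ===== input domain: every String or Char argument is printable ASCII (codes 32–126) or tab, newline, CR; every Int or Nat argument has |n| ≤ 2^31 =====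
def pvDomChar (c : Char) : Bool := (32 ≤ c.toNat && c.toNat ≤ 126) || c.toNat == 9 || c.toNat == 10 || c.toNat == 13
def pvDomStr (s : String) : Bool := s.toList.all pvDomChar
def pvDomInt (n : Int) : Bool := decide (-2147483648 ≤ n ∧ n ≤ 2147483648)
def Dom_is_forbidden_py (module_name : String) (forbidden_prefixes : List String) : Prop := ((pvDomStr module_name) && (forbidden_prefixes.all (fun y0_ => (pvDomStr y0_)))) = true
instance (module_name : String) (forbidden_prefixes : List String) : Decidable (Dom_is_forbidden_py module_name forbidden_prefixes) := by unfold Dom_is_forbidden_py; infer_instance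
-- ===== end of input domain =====

-- B walks the stripped name's dot-boundary ancestors against a set built once from the
-- prefixes, instead of scanning every prefix with startswith; equivalence proved exactly.

-- ===== PORT A =====
-- strings are handled as their character lists (PySem.Chars); 'str(module_name or "")'
-- on a str argument is module_name itself (empty stays empty), so name = module_name.strip().
def is_forbidden_py (module_name : String) (forbidden_prefixes : List String) : Bool :=
  let name := PySem.Chars.strip module_name.toList
  if name.isEmpty then false
  else
    forbidden_prefixes.any (fun pre =>
      name == pre.toList || PySem.Chars.startswith name (pre.toList ++ ['.']))

-- ===== PORT B =====
def is_forbidden_py_alt (module_name : String) (forbidden_prefixes : List String) : Bool :=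
  let name := PySem.Chars.strip module_name.toList
  if name.isEmpty then false
  else
    let forbidden : PySem.Set (List Char) := PySem.Set.ofList (forbidden_prefixes.map String.toList)
    let parts := PySem.Chars.splitOn name ['.']
    (PySem.List.pyRange (parts.length : Int) 0 (-1)).any (fun i =>
      PySem.Set.contains forbidden
        (PySem.Chars.join ['.'] (PySem.List.slice parts none (some i))))

-- ===== PRECONDITION & SPEC =====
def Spec_is_forbidden_py (module_name : String) (forbidden_prefixes : List String) (out : Bool) : Prop := out = is_forbidden_py_alt module_name forbidden_prefixes
instance (module_name : String) (forbidden_prefixes : List String) (out : Bool) : Decidable (Spec_is_forbidden_py module_name forbidden_prefixes out) := by unfold Spec_is_forbidden_py; infer_instance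

-- ===== CLAIM (what is proved, stated in full; the proofs are below) =====
def Claim_equal_is_forbidden_py : Prop := ∀ (module_name : String) (forbidden_prefixes : List String), Dom_is_forbidden_py module_name forbidden_prefixes → Spec_is_forbidden_py module_name forbidden_prefixes (is_forbidden_py module_name forbidden_prefixes)

-- ===== LEMMAS AND PROOFS =====

-- PySem's fueled char-split agrees with Mathlib's List.splitOnP for a one-char separator.
lemma pysplit_go_eq (c : Char) : ∀ (fuel : Nat) (l cur : List Char) (acc : List (List Char)), l.length < fuel →
    PySem.Chars.splitOn.go [c] fuel l cur acc
      = acc.reverse ++ (List.splitOnP (· == c) l).modifyHead (cur.reverse ++ ·) := by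
  intro fuel
  induction fuel with
  | zero => intro l cur acc h; omega
  | succ n ih =>
    intro l cur acc h
    cases l with
    | nil => simp [PySem.Chars.splitOn.go, List.splitOnP_nil]
    | cons c' rest =>
      by_cases hc : c = c'
      · subst hc
        have : PySem.Chars.splitOn.go [c] (n+1) (c :: rest) cur acc
            = PySem.Chars.splitOn.go [c] n rest [] (cur.reverse :: acc) := by
          simp [PySem.Chars.splitOn.go, List.isPrefixOf]
        rw [this, ih rest [] (cur.reverse :: acc) (by simpa using Nat.lt_of_succ_lt_succ h)]
        rw [List.splitOnP_cons]
        simp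
        cases List.splitOnP (fun x => x == c) rest <;> simp [List.modifyHead]
      · have : PySem.Chars.splitOn.go [c] (n+1) (c' :: rest) cur acc
            = PySem.Chars.splitOn.go [c] n rest (c' :: cur) acc := by
          simp [PySem.Chars.splitOn.go, List.isPrefixOf, hc]
        rw [this, ih rest (c' :: cur) acc (by simpa using Nat.lt_of_succ_lt_succ h)]
        rw [List.splitOnP_cons]
        have hbc : (c' == c) = false := by simpa using Ne.symm hc
        rw [if_neg (by simp [hbc])]
        obtain ⟨h0, t0, ht⟩ := List.exists_cons_of_ne_nil (List.splitOnP_ne_nil (· == c) rest)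
        simp [ht]
lemma pysplit_eq (c : Char) (s : List Char) :
    PySem.Chars.splitOn s [c] = List.splitOn c s := by
  rw [show PySem.Chars.splitOn s [c] = PySem.Chars.splitOn.go [c] (s.length + 1) s [] [] from rfl]
  rw [pysplit_go_eq c (s.length + 1) s [] [] (by omega)]
  obtain ⟨h0, t0, ht⟩ := List.exists_cons_of_ne_nil (List.splitOnP_ne_nil (· == c) s)
  simp [List.splitOn, ht]

lemma intercalate_cons_ne_nil (x : Char) (h : List Char) (l : List (List Char)) (hl : l ≠ []) :
    [x].intercalate (h :: l) = h ++ x :: [x].intercalate l := by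
  obtain ⟨l0, l', rfl⟩ := List.exists_cons_of_ne_nil hl
  simp [List.intercalate, List.intersperse_cons₂]

lemma intercalate_append_ne_nil (x : Char) (a b : List (List Char)) (ha : a ≠ []) (hb : b ≠ []) :
    [x].intercalate (a ++ b) = [x].intercalate a ++ x :: [x].intercalate b := by
  induction a with
  | nil => exact absurd rfl ha
  | cons h t ih =>
    cases t with
    | nil => simpa [List.intercalate] using intercalate_cons_ne_nil x h b hb
    | cons t0 t' =>
      rw [List.cons_append, intercalate_cons_ne_nil x h (t0 :: t' ++ b) (by simp),
          ih (by simp), intercalate_cons_ne_nil x h (t0 :: t') (by simp)]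
      simp

-- the heart: "name == p or name.startswith(p + '.')"  ⟺  p is a dot-boundary ancestor of name
lemma ancestor_iff (cs p : List Char) :
    (cs = p ∨ (p ++ ['.']) <+: cs)
      ↔ ∃ k : Nat, 1 ≤ k ∧ k ≤ (List.splitOn '.' cs).length ∧
          ['.'].intercalate ((List.splitOn '.' cs).take k) = p := by
  constructor
  · rintro (rfl | ⟨t, ht⟩)
    · refine ⟨(List.splitOn '.' cs).length, ?_, le_refl _, ?_⟩
      · exact List.length_pos_of_ne_nil (List.splitOnP_ne_nil _ cs)
      · rw [List.take_length]; exact List.intercalate_splitOn cs '.'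
    · have hcs : cs = p ++ '.' :: t := by simpa [List.append_assoc] using ht.symm
      subst hcs
      have hsplit : List.splitOn '.' (p ++ '.' :: t)
          = List.splitOnP (· == '.') p ++ List.splitOnP (· == '.') t := by
        simpa [List.splitOn] using List.splitOnP_append_cons (· == '.') p t '.' (by simp)
      refine ⟨(List.splitOnP (· == '.') p).length, ?_, ?_, ?_⟩
      · exact List.length_pos_of_ne_nil (List.splitOnP_ne_nil _ p)
      · rw [hsplit, List.length_append]; omega
      · rw [hsplit, List.take_left]
        simpa [List.splitOn] using List.intercalate_splitOn p '.'
  · rintro ⟨k, h1, h2, h3⟩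
    rcases eq_or_lt_of_le h2 with heq | hlt
    · left
      rw [heq, List.take_length, List.intercalate_splitOn cs '.'] at h3
      exact h3
    · right
      have hroundtrip := List.intercalate_splitOn cs '.'
      have hsplitcs : ['.'].intercalate (List.splitOn '.' cs) = cs := hroundtrip
      have hdecomp : List.splitOn '.' cs
          = (List.splitOn '.' cs).take k ++ (List.splitOn '.' cs).drop k :=
        (List.take_append_drop k _).symm
      have ha : (List.splitOn '.' cs).take k ≠ [] := by
        intro hnil
        rw [List.take_eq_nil_iff] at hnil
        rcases hnil with hnil | hnil
        · omega
        · exact List.splitOnP_ne_nil (· == '.') cs (by simpa [List.splitOn] using hnil)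
      have hbne : (List.splitOn '.' cs).drop k ≠ [] := by
        intro hnil
        rw [List.drop_eq_nil_iff] at hnil
        omega
      set t := ['.'].intercalate ((List.splitOn '.' cs).drop k) with hht
      have : cs = p ++ '.' :: t := by
        conv_lhs => rw [← hsplitcs, hdecomp]
        rw [intercalate_append_ne_nil '.' _ _ ha hbne, h3]
      exact ⟨t, by rw [this]; simp⟩

lemma mem_countdown (L i : Int) (hL : 0 ≤ L) :
    i ∈ PySem.List.pyRange L 0 (-1) ↔ 1 ≤ i ∧ i ≤ L := by
  rw [PySem.List.pyRange_neg_one]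
  simp only [List.mem_map, List.mem_range]
  constructor
  · rintro ⟨k, hk, rfl⟩; omega
  · rintro ⟨h1, h2⟩; exact ⟨(L - i).toNat, by omega, by omega⟩

-- the two loop bodies agree: scanning prefixes with startswith = walking ancestors in the set
lemma key_any (cs : List Char) (fps : List String) :
    (fps.any (fun pre => cs == pre.toList || PySem.Chars.startswith cs (pre.toList ++ ['.'])))
      = (PySem.List.pyRange (((PySem.Chars.splitOn cs ['.']).length : Int)) 0 (-1)).any
          (fun i => PySem.Set.contains (PySem.Set.ofList (fps.map String.toList))
            (PySem.Chars.join ['.'] (PySem.List.slice (PySem.Chars.splitOn cs ['.']) none (some i)))) := by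
  rw [Bool.eq_iff_iff]
  simp only [List.any_eq_true, Bool.or_eq_true, beq_iff_eq, PySem.Chars.startswith_iff]
  constructor
  · rintro ⟨pre, hmem, hcond⟩
    obtain ⟨k, h1, h2, h3⟩ := (ancestor_iff cs pre.toList).mp hcond
    refine ⟨(k : Int), ?_, ?_⟩
    · rw [mem_countdown _ _ (by positivity), pysplit_eq]
      constructor <;> [exact_mod_cast h1; exact_mod_cast h2]
    · rw [PySem.List.slice_to _ (by positivity)]
      simp only [Int.toNat_natCast, pysplit_eq]
      have : PySem.Chars.join ['.'] ((List.splitOn '.' cs).take k) = pre.toList := h3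
      rw [this]
      simp [PySem.Set.contains, PySem.Set.mem_ofList]
      exact ⟨pre, hmem, rfl⟩
  · rintro ⟨i, hi, hcont⟩
    rw [mem_countdown _ _ (by positivity)] at hi
    rw [PySem.List.slice_to _ (by omega)] at hcont
    simp only [PySem.Set.contains, List.contains_iff_mem, PySem.Set.mem_ofList,
      List.mem_map] at hcont
    obtain ⟨pre, hmem, hpre⟩ := hcont
    simp only [PySem.Chars.join] at hpre
    refine ⟨pre, hmem, (ancestor_iff cs pre.toList).mpr ⟨i.toNat, by omega, ?_, ?_⟩⟩
    · rw [← pysplit_eq]; omega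
    · rw [pysplit_eq] at hpre; exact hpre.symm

-- ===== VERDICT (by name: the statement is the Claim_ definition above) =====
theorem is_forbidden_py_spec : Claim_equal_is_forbidden_py := by
  intro module_name forbidden_prefixes _
  unfold Spec_is_forbidden_py is_forbidden_py is_forbidden_py_alt
  by_cases h : (PySem.Chars.strip module_name.toList).isEmpty
  · simp [h]
  · simp only [h, Bool.false_eq_true, if_false]
    exact key_any (PySem.Chars.strip module_name.toList) forbidden_prefixes
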